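-- pv_equiv track=rewrite | github.com/Dieote/FundamentosUE | Python/U2_resumen_notas.py | clasificar_por_rango
-- ===== SOURCE A (Python) =====
-- def clasificar_por_rango(puntuaciones, rangos):
--     """
--     Clasifica puntuaciones según rangos inclusivos.
--     """
--     resultado = {k: [] for k in rangos}
--     resultado['fuera_rango'] = []
--
--     for p in puntuaciones:
--         colocado = False
--         for nombre, (minv, maxv) in rangos.items():
--             if minv <= p <= maxv:
--                 resultado[nombre].append(p)
--                 colocado = True
--                 break
--         if not colocado:
--             resultado['fuera_rango'].append(p)
--
--     return resultado
-- ===== SOURCE B (Python) =====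
-- def clasificar_por_rango(puntuaciones, rangos):
--     """
--     Clasifica puntuaciones según rangos inclusivos: primero asigna un destino a
--     cada valor distinto particionando el conjunto de valores rango a rango,
--     luego agrupa las puntuaciones en una sola pasada.
--     """
--     pendientes = list(dict.fromkeys(puntuaciones))
--     destino = {}
--     for nombre, (minv, maxv) in rangos.items():
--         for v in pendientes:
--             if minv <= v <= maxv:
--                 destino[v] = nombre
--         pendientes = [v for v in pendientes if not (minv <= v <= maxv)]
--     for v in pendientes:
--         destino[v] = 'fuera_rango'
--
--     resultado = {k: [] for k in rangos}
--     resultado['fuera_rango'] = []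
--     for p in puntuaciones:
--         resultado[destino[p]].append(p)
--     return resultado
-- ===== Notes on version B (the rewrite author's own statement) =====
-- stated objective: alternative
-- what changed: B first assigns each DISTINCT score value a destination name by partitioning the distinct-value pool range by range (transposed loops), then groups all scores in a single pass through that map, instead of A's per-score first-match scan over the ranges.
import Mathlib
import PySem

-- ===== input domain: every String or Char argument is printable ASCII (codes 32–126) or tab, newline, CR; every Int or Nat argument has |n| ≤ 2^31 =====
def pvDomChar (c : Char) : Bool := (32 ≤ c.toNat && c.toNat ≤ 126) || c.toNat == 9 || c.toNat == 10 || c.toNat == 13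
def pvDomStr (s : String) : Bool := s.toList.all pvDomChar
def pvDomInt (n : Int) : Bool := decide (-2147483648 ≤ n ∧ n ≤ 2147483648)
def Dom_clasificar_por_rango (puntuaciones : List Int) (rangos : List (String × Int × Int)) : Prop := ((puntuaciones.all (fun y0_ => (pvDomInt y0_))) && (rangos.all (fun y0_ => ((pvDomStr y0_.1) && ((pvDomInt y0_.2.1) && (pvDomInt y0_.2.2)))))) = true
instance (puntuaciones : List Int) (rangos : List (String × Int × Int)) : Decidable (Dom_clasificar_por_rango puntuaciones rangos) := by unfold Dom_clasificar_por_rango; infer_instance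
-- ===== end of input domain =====

-- B classifies each DISTINCT value once — partitioning the distinct-value pool
-- range by range into a destination map — and then groups the scores in one
-- pass through that map, instead of A's first-match scan over the ranges for
-- every single score: an alternative decomposition, equal on all inputs.

-- ===== PORT A =====
def clasificar_por_rango (puntuaciones : List Int) (rangos : List (String × Int × Int)) : List (String × List Int) :=
  -- resultado = {k: [] for k in rangos}
  let resultado : PySem.Dict String (List Int) :=
    rangos.foldl (fun d r => d.insert r.1 []) PySem.Dict.empty
  -- resultado['fuera_rango'] = []
  let resultado := resultado.insert "fuera_rango" ([] : List Int)
  -- for p in puntuaciones: inner for/break over rangos.items() = find? of the first inclusive match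
  let resultado := puntuaciones.foldl (fun d p =>
    match rangos.find? (fun r => decide (r.2.1 ≤ p ∧ p ≤ r.2.2)) with
    | some r => d.modify r.1 [] (fun l => l ++ [p])          -- resultado[nombre].append(p) (key always present)
    | none   => d.modify "fuera_rango" [] (fun l => l ++ [p])) resultado
  resultado.items

-- ===== PORT B =====
def clasificar_por_rango_alt (puntuaciones : List Int) (rangos : List (String × Int × Int)) : List (String × List Int) :=
  -- pendientes = list(dict.fromkeys(puntuaciones))
  let pendientes := PySem.List.dedup puntuaciones
  -- for nombre, (minv, maxv) in rangos.items(): assign matching pending values, shrink the pool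
  let st := rangos.foldl
    (fun (st : PySem.Dict Int String × List Int) r =>
      (st.2.foldl (fun d v => if decide (r.2.1 ≤ v ∧ v ≤ r.2.2) then d.insert v r.1 else d) st.1,
       st.2.filter (fun v => !(decide (r.2.1 ≤ v ∧ v ≤ r.2.2)))))
    (PySem.Dict.empty, pendientes)
  -- for v in pendientes: destino[v] = 'fuera_rango'
  let destino := st.2.foldl (fun d v => d.insert v "fuera_rango") st.1
  -- resultado = {k: [] for k in rangos}; resultado['fuera_rango'] = []
  let resultado : PySem.Dict String (List Int) :=
    rangos.foldl (fun d r => d.insert r.1 []) PySem.Dict.empty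
  let resultado := resultado.insert "fuera_rango" ([] : List Int)
  -- for p in puntuaciones: resultado[destino[p]].append(p)  (key always present)
  let resultado := puntuaciones.foldl (fun d p =>
    d.modify (destino.getD p "") [] (fun l => l ++ [p])) resultado
  resultado.items

-- ===== PRECONDITION & SPEC =====
def Spec_clasificar_por_rango (puntuaciones : List Int) (rangos : List (String × Int × Int)) (out : List (String × List Int)) : Prop := out = clasificar_por_rango_alt puntuaciones rangos
instance (puntuaciones : List Int) (rangos : List (String × Int × Int)) (out : List (String × List Int)) : Decidable (Spec_clasificar_por_rango puntuaciones rangos out) := by unfold Spec_clasificar_por_rango; infer_instance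

-- ===== CLAIM (what is proved, stated in full; the proofs are below) =====
def Claim_equal_clasificar_por_rango : Prop := ∀ (puntuaciones : List Int) (rangos : List (String × Int × Int)), Dom_clasificar_por_rango puntuaciones rangos → Spec_clasificar_por_rango puntuaciones rangos (clasificar_por_rango puntuaciones rangos)

-- ===== LEMMAS AND PROOFS =====

-- the key ('fuera_rango' or the name of the first matching range) a score is filed under
def pvKey (rangos : List (String × Int × Int)) (p : Int) : String :=
  match rangos.find? (fun r => decide (r.2.1 ≤ p ∧ p ≤ r.2.2)) with
  | some r => r.1
  | none   => "fuera_rango"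

lemma pvKey_cons (r : String × Int × Int) (rs : List (String × Int × Int)) (p : Int) :
    pvKey (r :: rs) p = if r.2.1 ≤ p ∧ p ≤ r.2.2 then r.1 else pvKey rs p := by
  unfold pvKey
  rw [List.find?_cons]
  by_cases hc : r.2.1 ≤ p ∧ p ≤ r.2.2 <;> simp [hc]

-- B's destination map, as one function of the remaining pool (for induction over rangos)
def pvChain (rangos : List (String × Int × Int)) (d : PySem.Dict Int String)
    (pend : List Int) : PySem.Dict Int String :=
  let st := rangos.foldl
    (fun (st : PySem.Dict Int String × List Int) r =>
      (st.2.foldl (fun d v => if decide (r.2.1 ≤ v ∧ v ≤ r.2.2) then d.insert v r.1 else d) st.1,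
       st.2.filter (fun v => !(decide (r.2.1 ≤ v ∧ v ≤ r.2.2)))))
    (d, pend)
  st.2.foldl (fun d v => d.insert v "fuera_rango") st.1

lemma pvChain_nil (d : PySem.Dict Int String) (pend : List Int) :
    pvChain [] d pend = pend.foldl (fun d v => d.insert v "fuera_rango") d := rfl

lemma pvChain_cons (r : String × Int × Int) (rs : List (String × Int × Int))
    (d : PySem.Dict Int String) (pend : List Int) :
    pvChain (r :: rs) d pend =
      pvChain rs
        (pend.foldl (fun d v => if decide (r.2.1 ≤ v ∧ v ≤ r.2.2) then d.insert v r.1 else d) d)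
        (pend.filter (fun v => !(decide (r.2.1 ≤ v ∧ v ≤ r.2.2)))) := rfl

-- one conditional constant-valued insertion pass
lemma pvFoldIns_getD (m : Int → Bool) (c : String) (l : List Int)
    (d : PySem.Dict Int String) (x : Int) :
    (l.foldl (fun d v => if m v then d.insert v c else d) d).getD x ""
      = if x ∈ l ∧ m x = true then c else d.getD x "" := by
  induction l generalizing d with
  | nil => simp
  | cons a t ih =>
    rw [List.foldl_cons, ih]
    by_cases hxt : x ∈ t ∧ m x = true
    · simp [hxt]
    · by_cases hxa : x = a
      · subst hxa
        by_cases hm : m x = true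
        · have hx : x ∈ x :: t ∧ m x = true := ⟨by simp, hm⟩
          simp [hxt, hx, hm, PySem.Dict.getD_insert]
        · simp [hxt, hm, fun (h : x ∈ x :: t ∧ m x = true) => hm h.2]
      · have hne : ¬(x ∈ a :: t ∧ m x = true) := by
          intro h
          rcases List.mem_cons.mp h.1 with h1 | h1
          · exact hxa h1
          · exact hxt ⟨h1, h.2⟩
        simp only [hxt, if_false, hne]
        split
        · rw [PySem.Dict.getD_insert, if_neg hxa]
        · rfl

lemma pvFoldIns_getD' (l : List Int) (d : PySem.Dict Int String) (x : Int) :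
    (l.foldl (fun d v => d.insert v "fuera_rango") d).getD x ""
      = if x ∈ l then "fuera_rango" else d.getD x "" := by
  have h := pvFoldIns_getD (fun _ => true) "fuera_rango" l d x
  simp only [if_true] at h
  simpa using h

-- values outside the pool are never touched
lemma pvChain_frozen (rs : List (String × Int × Int)) :
    ∀ (pend : List Int) (d : PySem.Dict Int String) (x : Int), x ∉ pend →
      (pvChain rs d pend).getD x "" = d.getD x "" := by
  induction rs with
  | nil =>
    intro pend d x hx
    rw [pvChain_nil, pvFoldIns_getD', if_neg hx]
  | cons r t ih =>
    intro pend d x hx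
    rw [pvChain_cons]
    rw [ih _ _ x (fun hmem => hx (List.mem_of_mem_filter hmem))]
    rw [pvFoldIns_getD]
    simp [hx]

-- every value in the pool is mapped to the key A would file it under
lemma pvChain_getD (rs : List (String × Int × Int)) :
    ∀ (pend : List Int) (d : PySem.Dict Int String) (x : Int), x ∈ pend →
      (pvChain rs d pend).getD x "" = pvKey rs x := by
  induction rs with
  | nil =>
    intro pend d x hx
    rw [pvChain_nil, pvFoldIns_getD', if_pos hx]
    rfl
  | cons r t ih =>
    intro pend d x hx
    rw [pvChain_cons, pvKey_cons]
    by_cases hm : r.2.1 ≤ x ∧ x ≤ r.2.2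
    · have hnot : x ∉ pend.filter (fun v => !(decide (r.2.1 ≤ v ∧ v ≤ r.2.2))) := by
        intro hmem
        have := List.of_mem_filter hmem
        simp [hm] at this
      rw [pvChain_frozen t _ _ x hnot, pvFoldIns_getD, if_pos ⟨hx, by simp [hm]⟩, if_pos hm]
    · have hmem : x ∈ pend.filter (fun v => !(decide (r.2.1 ≤ v ∧ v ≤ r.2.2))) :=
        List.mem_filter.mpr ⟨hx, by simp [hm]⟩
      rw [ih _ _ x hmem, if_neg hm]

-- ===== VERDICT (by name: the statement is the Claim_ definition above) =====
theorem clasificar_por_rango_spec : Claim_equal_clasificar_por_rango := by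
  intro punt rangos _
  unfold Spec_clasificar_por_rango
  simp only [clasificar_por_rango, clasificar_por_rango_alt]
  congr 1
  apply PySem.List.foldl_congr_mem
  intro d p hp
  have hdest : (pvChain rangos PySem.Dict.empty (PySem.List.dedup punt)).getD p ""
      = pvKey rangos p :=
    pvChain_getD rangos (PySem.List.dedup punt) PySem.Dict.empty p
      ((PySem.List.mem_dedup punt p).mpr hp)
  rw [show (rangos.foldl
        (fun (st : PySem.Dict Int String × List Int) r =>
          (st.2.foldl (fun d v => if decide (r.2.1 ≤ v ∧ v ≤ r.2.2) then d.insert v r.1 else d) st.1,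
           st.2.filter (fun v => !(decide (r.2.1 ≤ v ∧ v ≤ r.2.2)))))
        (PySem.Dict.empty, PySem.List.dedup punt)).2.foldl
        (fun d v => d.insert v "fuera_rango")
        (rangos.foldl
          (fun (st : PySem.Dict Int String × List Int) r =>
            (st.2.foldl (fun d v => if decide (r.2.1 ≤ v ∧ v ≤ r.2.2) then d.insert v r.1 else d) st.1,
             st.2.filter (fun v => !(decide (r.2.1 ≤ v ∧ v ≤ r.2.2)))))
          (PySem.Dict.empty, PySem.List.dedup punt)).1
      = pvChain rangos PySem.Dict.empty (PySem.List.dedup punt) from rfl, hdest]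
  unfold pvKey
  cases h : rangos.find? (fun r => decide (r.2.1 ≤ p ∧ p ≤ r.2.2)) <;> simp only [h]
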